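-- pv_equiv track=rewrite | github.com/vickysvicky/CS516x | sudokuSolver/sudokuSolver.py | getCoorT
-- ===== SOURCE A (Python) =====
-- def getCoorT(include_masked=False, matrix=None):
-- 	"""
-- 	return list of coor if matrix is transposed and flatten
-- 	also return list of predefined number for each column, must set include_masked to True and the *original matrix*.
-- 	"""
-- 	tmp_coor = [ list(range(j*9, j*9+9)) for j in range(9)]
-- 	tmp_coor = getTranspose(tmp_coor)
-- 	coor = []
-- 	for row in tmp_coor:
-- 		coor.extend(row)
-- 	col_pre = [ [] for _ in range(9) ]
-- 	if include_masked:
-- 		for i, row in enumerate(matrix):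
-- 			for j, num in enumerate(row):
-- 				if num != 0:
-- 					col_pre[j].append(num)
-- 	return coor, col_pre
--
-- def getTranspose(square_matrix):
-- 	"""
-- 	returns transposed matrix
-- 	"""
-- 	matrixT = [ [] for _ in range(9) ]
-- 	for row in square_matrix:
-- 		for idx, num in enumerate(row):
-- 			matrixT[idx].append(num)
-- 	return matrixT
-- ===== SOURCE B (Python) =====
-- def getCoorT(include_masked=False, matrix=None):
--     """
--     return list of coor if matrix is transposed and flatten
--     also return list of predefined number for each column, must set include_masked to True and the *original matrix*.
--     """
--     coor = [j * 9 + idx for idx in range(9) for j in range(9)]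
--     if not include_masked:
--         return coor, [[] for _ in range(9)]
--     col_pre = [[row[j] for row in matrix if j < len(row) and row[j] != 0]
--                for j in range(9)]
--     return coor, col_pre
-- ===== Notes on version B (the rewrite author's own statement) =====
-- stated objective: simpler
-- what changed: coor is produced by its closed-form comprehension instead of building a 9x9 grid, transposing it with a helper and flattening; col_pre is built column-wise by one comprehension per column instead of a row-major double loop mutating col_pre[j].
import Mathlib
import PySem

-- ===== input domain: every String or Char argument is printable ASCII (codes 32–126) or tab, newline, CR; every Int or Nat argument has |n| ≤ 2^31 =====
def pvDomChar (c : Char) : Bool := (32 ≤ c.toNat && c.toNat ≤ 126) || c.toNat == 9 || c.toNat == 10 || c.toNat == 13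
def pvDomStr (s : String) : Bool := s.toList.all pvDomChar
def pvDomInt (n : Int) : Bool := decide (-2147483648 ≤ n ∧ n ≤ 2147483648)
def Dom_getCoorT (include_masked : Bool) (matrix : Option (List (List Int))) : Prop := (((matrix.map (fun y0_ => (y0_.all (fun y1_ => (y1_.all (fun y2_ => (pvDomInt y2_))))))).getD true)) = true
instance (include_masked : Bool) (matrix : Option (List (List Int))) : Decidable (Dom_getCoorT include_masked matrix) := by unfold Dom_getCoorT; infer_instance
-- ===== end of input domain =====

-- ===== PORT A =====
-- B replaces A's grid-build/transpose/flatten for coor by its closed-form comprehension,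
-- and builds col_pre column-wise instead of row-major mutation; same return values on Pre_.

-- col_pre[j].append(num): Python raises IndexError when j is out of range; those inputs are
-- excluded by Pre_getCoorT (the port's List.modify is a no-op there).
def pyAppendAt (xss : List (List Int)) (j : Int) (x : Int) : List (List Int) :=
  xss.modify j.toNat (fun l => l ++ [x])

def getTranspose (square_matrix : List (List Int)) : List (List Int) :=
  let matrixT := (PySem.List.pyRange 0 9 1).map (fun _ => ([] : List Int))
  square_matrix.foldl
    (fun matrixT row =>
      (PySem.List.enumerate row).foldl
        (fun matrixT p => pyAppendAt matrixT p.1 p.2) matrixT)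
    matrixT

def getCoorT (include_masked : Bool) (matrix : Option (List (List Int))) : List Int × List (List Int) :=
  let tmp_coor := (PySem.List.pyRange 0 9 1).map (fun j => PySem.List.pyRange (j * 9) (j * 9 + 9) 1)
  let tmp_coor := getTranspose tmp_coor
  let coor := tmp_coor.foldl (fun coor row => coor ++ row) []
  let col_pre := (PySem.List.pyRange 0 9 1).map (fun _ => ([] : List Int))
  let col_pre :=
    if include_masked then
      -- 'for i, row in enumerate(matrix)': i is unused; iterating None raises (excluded by Pre_)
      (matrix.getD []).foldl
        (fun col_pre row =>
          (PySem.List.enumerate row).foldl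
            (fun col_pre p => if p.2 ≠ 0 then pyAppendAt col_pre p.1 p.2 else col_pre)
            col_pre)
        col_pre
    else col_pre
  (coor, col_pre)

-- ===== PORT B =====
def getCoorT_alt (include_masked : Bool) (matrix : Option (List (List Int))) : List Int × List (List Int) :=
  let coor := (PySem.List.pyRange 0 9 1).flatMap
    (fun idx => (PySem.List.pyRange 0 9 1).map (fun j => j * 9 + idx))
  if !include_masked then
    (coor, (PySem.List.pyRange 0 9 1).map (fun _ => ([] : List Int)))
  else
    let col_pre := (PySem.List.pyRange 0 9 1).map (fun j =>
      (matrix.getD []).filterMap (fun (row : List Int) =>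
        match PySem.List.pyGet? row j with
        | some v => if v ≠ 0 then some v else none
        | none => none))
    (coor, col_pre)

-- ===== PRECONDITION & SPEC =====
-- Pre_ excludes exactly the inputs where Python A raises: include_masked=True with matrix=None
-- (TypeError) or with some row holding a nonzero entry at index >= 9 (IndexError in col_pre[j]).
def Pre_getCoorT (include_masked : Bool) (matrix : Option (List (List Int))) : Prop :=
  include_masked = true →
    matrix ≠ none ∧ ∀ row ∈ matrix.getD [], ∀ x ∈ row.drop 9, x = 0
instance (include_masked : Bool) (matrix : Option (List (List Int))) : Decidable (Pre_getCoorT include_masked matrix) := by unfold Pre_getCoorT; infer_instance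

def pvWitness_getCoorT : Bool × Option (List (List Int)) :=
  (true, some [[1, 0, 2], [0, 5, 0, 0, 0, 0, 0, 0, 7]])

def Spec_getCoorT (include_masked : Bool) (matrix : Option (List (List Int))) (out : List Int × List (List Int)) : Prop := out = getCoorT_alt include_masked matrix
instance (include_masked : Bool) (matrix : Option (List (List Int))) (out : List Int × List (List Int)) : Decidable (Spec_getCoorT include_masked matrix out) := by unfold Spec_getCoorT; infer_instance

-- ===== CLAIM (what is proved, stated in full; the proofs are below) =====
def Claim_equal_getCoorT : Prop := ∀ (include_masked : Bool) (matrix : Option (List (List Int))), Dom_getCoorT include_masked matrix → Pre_getCoorT include_masked matrix → Spec_getCoorT include_masked matrix (getCoorT include_masked matrix)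

-- ===== LEMMAS AND PROOFS =====

-- contribution of one row to column j
def colFilter (j : Nat) (row : List Int) : List Int :=
  match row[j]? with
  | some v => if v ≠ 0 then [v] else []
  | none => []

-- index-carrying form of A's inner (enumerate) loop
def foldE (cp : List (List Int)) (i : Nat) (row : List Int) : List (List Int) :=
  match row with
  | [] => cp
  | x :: xs => foldE (if x ≠ 0 then pyAppendAt cp i x else cp) (i + 1) xs

lemma enumerate_foldl_eq_foldE (row : List Int) (cp : List (List Int)) (i : Nat) :
    (PySem.List.enumerate row i).foldl
      (fun col_pre p => if p.2 ≠ 0 then pyAppendAt col_pre p.1 p.2 else col_pre) cp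
      = foldE cp i row := by
  induction row generalizing cp i with
  | nil => simp [PySem.List.enumerate_nil, foldE]
  | cons x xs ih =>
    rw [PySem.List.enumerate_cons]
    simp only [List.foldl_cons, foldE]
    have harg : ((i : Int) + 1) = ((i + 1 : Nat) : Int) := by push_cast; ring
    rw [harg]
    exact ih _ _

lemma enumerate_foldl0 (row : List Int) (cp : List (List Int)) :
    (PySem.List.enumerate row).foldl
      (fun col_pre p => if p.2 ≠ 0 then pyAppendAt col_pre p.1 p.2 else col_pre) cp
      = foldE cp 0 row := by
  have h := enumerate_foldl_eq_foldE row cp 0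
  simpa using h

lemma getElem?_pyAppendAt_ne (cp : List (List Int)) (i j : Nat) (x : Int) (h : i ≠ j) :
    (pyAppendAt cp (i : Int) x)[j]? = cp[j]? := by
  simp [pyAppendAt, List.getElem?_modify]
  cases hc : cp[j]? <;> simp [h]

lemma getElem?_foldE (row : List Int) (cp : List (List Int)) (i j : Nat) :
    (foldE cp i row)[j]? =
      if j < i then cp[j]? else (cp[j]?).map (fun l => l ++ colFilter (j - i) row) := by
  induction row generalizing cp i with
  | nil =>
    simp only [foldE, colFilter]
    split
    · rfl
    · cases hc : cp[j]? <;> simp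
  | cons x xs ih =>
    simp only [foldE]
    rw [ih]
    rcases Nat.lt_trichotomy j i with h | h | h
    · have h1 : j < i + 1 := by omega
      have hij : i ≠ j := by omega
      simp only [if_pos h, if_pos h1]
      split
      · exact getElem?_pyAppendAt_ne cp i j x hij
      · rfl
    · subst h
      have h1 : ¬ j < j := by omega
      have h2 : j < j + 1 := by omega
      simp only [if_pos h2, if_neg h1, Nat.sub_self]
      split
      · rename_i hx
        simp only [pyAppendAt, Int.toNat_natCast, List.getElem?_modify]
        cases hc : cp[j]? <;> simp [colFilter, hx]
      · rename_i hx
        simp only [ne_eq, not_not] at hx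
        cases hc : cp[j]? <;> simp [colFilter, hx]
    · have h1 : ¬ j < i := by omega
      have h2 : ¬ j < i + 1 := by omega
      have hij : i ≠ j := by omega
      simp only [if_neg h1, if_neg h2]
      have hcp : (if x ≠ 0 then pyAppendAt cp (i : Int) x else cp)[j]? = cp[j]? := by
        split
        · exact getElem?_pyAppendAt_ne cp i j x hij
        · rfl
      rw [hcp]
      have hj : j - i = (j - (i + 1)) + 1 := by omega
      rw [hj]
      cases hc : cp[j]? <;> simp [colFilter]

lemma getElem?_rows_foldl (m : List (List Int)) (cp : List (List Int)) (j : Nat) :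
    (m.foldl (fun col_pre row =>
        (PySem.List.enumerate row).foldl
          (fun col_pre p => if p.2 ≠ 0 then pyAppendAt col_pre p.1 p.2 else col_pre)
          col_pre) cp)[j]? =
      (cp[j]?).map (fun l => l ++ m.flatMap (colFilter j)) := by
  induction m generalizing cp with
  | nil => cases hc : cp[j]? <;> simp [hc]
  | cons row rest ih =>
    simp only [List.foldl_cons]
    rw [ih, enumerate_foldl0, getElem?_foldE]
    have h0 : ¬ j < 0 := by omega
    simp only [if_neg h0, Nat.sub_zero, List.flatMap_cons]
    cases hc : cp[j]? <;> simp

lemma colFilter_eq_filterMap (m : List (List Int)) (j : Nat) :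
    m.flatMap (colFilter j) =
      m.filterMap (fun (row : List Int) =>
        match PySem.List.pyGet? row ((j : Nat) : Int) with
        | some v => if v ≠ 0 then some v else none
        | none => none) := by
  induction m with
  | nil => rfl
  | cons row rest ih =>
    have ih' := ih
    simp only [List.flatMap_cons, List.filterMap_cons, PySem.List.pyGet?_natCast] at ih' ⊢
    rw [ih']
    cases hc : row[j]? with
    | none => simp [colFilter, hc]
    | some v => by_cases hv : v = 0 <;> simp [colFilter, hc, hv]

lemma getElem?_map_pyRange9 {α : Type} (f : Int → α) (j : Nat) (hj : j < 9) :
    ((PySem.List.pyRange 0 9 1).map f)[j]? = some (f (j : Int)) := by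
  have h := PySem.List.getElem?_map_pyRange_zero f 9 j hj
  simpa using h

set_option maxRecDepth 20000 in
lemma coor_parts_eq :
    ((getTranspose ((PySem.List.pyRange 0 9 1).map
        (fun j => PySem.List.pyRange (j * 9) (j * 9 + 9) 1))).foldl
        (fun coor row => coor ++ row) []) =
      (PySem.List.pyRange 0 9 1).flatMap
        (fun idx => (PySem.List.pyRange 0 9 1).map (fun j => j * 9 + idx)) := by
  decide

lemma col_pre_eq (m : List (List Int)) :
    (m.foldl (fun col_pre row =>
        (PySem.List.enumerate row).foldl
          (fun col_pre p => if p.2 ≠ 0 then pyAppendAt col_pre p.1 p.2 else col_pre)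
          col_pre) ((PySem.List.pyRange 0 9 1).map (fun _ => ([] : List Int)))) =
      (PySem.List.pyRange 0 9 1).map (fun j =>
        m.filterMap (fun (row : List Int) =>
          match PySem.List.pyGet? row j with
          | some v => if v ≠ 0 then some v else none
          | none => none)) := by
  apply List.ext_getElem?
  intro j
  rw [getElem?_rows_foldl]
  by_cases hj : j < 9
  · rw [getElem?_map_pyRange9 _ j hj, getElem?_map_pyRange9 _ j hj]
    simp only [Option.map_some, List.nil_append]
    rw [colFilter_eq_filterMap]
  · have hlen : ∀ f : Int → List Int, ((PySem.List.pyRange 0 9 1).map f)[j]? = none := by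
      intro f
      rw [List.getElem?_eq_none]
      rw [List.length_map, PySem.List.length_pyRange_one]
      omega
    rw [hlen, hlen]
    rfl

-- ===== VERDICT (by name: the statement is the Claim_ definition above) =====
theorem getCoorT_spec : Claim_equal_getCoorT := by
  intro b matrix _ _
  unfold Spec_getCoorT getCoorT getCoorT_alt
  cases b with
  | false =>
    simp only [Bool.false_eq_true, if_false, Bool.not_false, if_true]
    exact congrArg₂ Prod.mk coor_parts_eq rfl
  | true =>
    simp only [Bool.not_true, Bool.false_eq_true, if_false, reduceIte]
    exact congrArg₂ Prod.mk coor_parts_eq (col_pre_eq (matrix.getD []))
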